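-- pv_equiv track=rewrite | github.com/Junliang-Zhou/CS526 | mid-term Q3.py | max_items_selected
-- ===== SOURCE A (Python) =====
-- def max_items_selected(categories):
--     left = 0
--     max_len = 0
--     basket = {}
--
--     for right in range(len(categories)):
--         cat = categories[right]
--         basket[cat] = basket.get(cat, 0) + 1
--
--         while len(basket) > 2:
--             left_cat = categories[left]
--             basket[left_cat] -= 1
--             if basket[left_cat] == 0:
--                 del basket[left_cat]
--             left += 1
--
--         max_len = max(max_len, right - left + 1)
--
--     return max_len
-- ===== SOURCE B (Python) =====
-- def max_items_selected(categories):
--     left = 0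
--     best = 0
--     for right in range(len(categories)):
--         while len(set(categories[left:right + 1])) > 2:
--             left += 1
--         best = max(best, right - left + 1)
--     return best
-- ===== Notes on version B (the rewrite author's own statement) =====
-- stated objective: simpler
-- what changed: B drops A's count dictionary with its decrement-and-delete while-loop and instead advances the left pointer while the distinct count of the current slice, recomputed with set(), exceeds 2.
import Mathlib
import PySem

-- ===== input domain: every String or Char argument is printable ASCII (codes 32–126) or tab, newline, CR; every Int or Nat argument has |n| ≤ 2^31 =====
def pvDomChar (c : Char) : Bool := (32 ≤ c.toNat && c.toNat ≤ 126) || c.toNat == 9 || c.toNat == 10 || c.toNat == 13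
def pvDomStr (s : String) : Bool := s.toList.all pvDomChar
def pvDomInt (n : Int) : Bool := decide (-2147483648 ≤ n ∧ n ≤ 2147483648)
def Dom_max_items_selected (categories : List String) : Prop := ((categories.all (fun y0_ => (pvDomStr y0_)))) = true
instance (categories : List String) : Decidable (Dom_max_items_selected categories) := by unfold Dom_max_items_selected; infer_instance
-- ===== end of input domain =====

-- B replaces A's count dictionary (decrement-and-delete while-loop) by a simpler two-pointer
-- that advances left while the distinct count of the current slice, recomputed via set(), exceeds 2.

-- ===== PORT A =====
-- the inner 'while len(basket) > 2' loop; fuel bounds the iterations (the loop always exits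
-- within categories.length steps, proved below); left is a Nat since Python's left only counts up
def pvAWhile (cats : List String) : Nat → PySem.Dict String Int → Nat → PySem.Dict String Int × Nat
  | 0, b, l => (b, l)
  | fuel+1, b, l =>
    if 2 < b.size then
      let lc := cats.getD l ""          -- categories[left]; always in range when the loop runs
      let b1 := b.modify lc 0 (· - 1)   -- basket[left_cat] -= 1
      let b2 := if b1.getD lc 0 = 0 then b1.erase lc else b1
      pvAWhile cats fuel b2 (l+1)
    else (b, l)

def pvAStep (cats : List String) (st : Nat × Int × PySem.Dict String Int) (r : Nat) :
    Nat × Int × PySem.Dict String Int :=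
  let cat := cats.getD r ""                     -- categories[right]; right ∈ range(len)
  let b := st.2.2.modify cat 0 (· + 1)          -- basket[cat] = basket.get(cat, 0) + 1
  let res := pvAWhile cats cats.length b st.1
  (res.2, max st.2.1 ((r : Int) - (res.2 : Int) + 1), res.1)

def max_items_selected (categories : List String) : Int :=
  ((List.range categories.length).foldl (pvAStep categories)
    (0, 0, PySem.Dict.empty)).2.1

-- ===== PORT B =====
-- the inner 'while len(set(categories[left:right+1])) > 2' loop of Source B
def pvBWhile (cats : List String) : Nat → Nat → Nat → Nat
  | 0, l, _ => l
  | fuel+1, l, r =>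
    if 2 < (PySem.Set.ofList
        (PySem.List.slice cats (some (l : Int)) (some ((r : Int) + 1)))).length then
      pvBWhile cats fuel (l+1) r
    else l

def pvBStep (cats : List String) (st : Nat × Int) (r : Nat) : Nat × Int :=
  let l := pvBWhile cats cats.length st.1 r
  (l, max st.2 ((r : Int) - (l : Int) + 1))

def max_items_selected_alt (categories : List String) : Int :=
  ((List.range categories.length).foldl (pvBStep categories) (0, 0)).2

-- ===== PRECONDITION & SPEC =====
def Spec_max_items_selected (categories : List String) (out : Int) : Prop := out = max_items_selected_alt categories
instance (categories : List String) (out : Int) : Decidable (Spec_max_items_selected categories out) := by unfold Spec_max_items_selected; infer_instance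

-- ===== CLAIM (what is proved, stated in full; the proofs are below) =====
def Claim_equal_max_items_selected : Prop := ∀ (categories : List String), Dom_max_items_selected categories → Spec_max_items_selected categories (max_items_selected categories)

-- ===== LEMMAS AND PROOFS =====

-- the current window: categories[l : p] (indices l, …, p-1)
def pvW (cats : List String) (p l : Nat) : List String := (cats.drop l).take (p - l)

-- A's basket is exactly the multiset of the window: lookup = count, keys = members
def pvInv (cats : List String) (p l : Nat) (b : PySem.Dict String Int) : Prop :=
  l ≤ p ∧ b.keys.Nodup ∧
  (∀ c, b.getD c 0 = ((pvW cats p l).count c : Int)) ∧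
  (∀ c, c ∈ b.keys ↔ c ∈ pvW cats p l)

theorem pv_find?_filter_ne (items : List (String × Int)) (k c : String) :
    (items.filter (fun p => !(p.1 == k))).find? (fun p => p.1 == c)
      = if c = k then none else items.find? (fun p => p.1 == c) := by
  induction items with
  | nil => simp only [List.filter_nil, List.find?_nil]; split <;> rfl
  | cons p rest ih =>
    by_cases hpk : p.1 = k
    · rcases eq_or_ne c k with hck | hck
      · simp [hpk, hck]
      · have hkc : (k == c) = false := by simp [Ne.symm hck]
        simp [hpk, ih, hck, hkc]
    · by_cases hpc : p.1 = c
      · have hck : c ≠ k := by rw [← hpc]; exact hpk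
        simp [hpc, hck]
      · simp [hpk, hpc, ih]

theorem pv_get?_erase {d : PySem.Dict String Int} {k c : String} :
    (d.erase k).get? c = if c = k then none else d.get? c := by
  rcases d with ⟨items⟩
  simp only [PySem.Dict.erase, PySem.Dict.get?, pv_find?_filter_ne]
  split <;> rfl

theorem pv_getD_erase {d : PySem.Dict String Int} {k c : String} :
    (d.erase k).getD c 0 = if c = k then 0 else d.getD c 0 := by
  simp [PySem.Dict.getD, pv_get?_erase]; split <;> rfl

theorem pv_keys_erase (d : PySem.Dict String Int) (k : String) :
    (d.erase k).keys = d.keys.filter (fun c => !(c == k)) := by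
  rcases d with ⟨items⟩
  simp [PySem.Dict.erase, PySem.Dict.keys, List.filter_map, Function.comp_def]

theorem pv_size_eq_keys_length (d : PySem.Dict String Int) :
    d.size = d.keys.length := by
  rcases d with ⟨items⟩; simp [PySem.Dict.size, PySem.Dict.keys]

-- under the invariant, len(basket) is the number of distinct elements of the window
theorem pv_size_eq_distinct (cats : List String) (p l : Nat) (b : PySem.Dict String Int)
    (h : pvInv cats p l b) :
    b.size = (PySem.Set.ofList (pvW cats p l)).length := by
  obtain ⟨-, hnd, -, hmem⟩ := h
  rw [pv_size_eq_keys_length]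
  refine List.Perm.length_eq ?_
  refine (List.perm_ext_iff_of_nodup hnd (PySem.Set.nodup_ofList _)).2 ?_
  intro c
  rw [hmem c, PySem.Set.mem_ofList]

theorem pv_W_cons (cats : List String) (p l : Nat) (hlp : l < p) (hl : l < cats.length) :
    pvW cats p l = cats.getD l "" :: pvW cats p (l + 1) := by
  unfold pvW
  rw [List.drop_eq_getElem_cons hl]
  have : p - l = (p - (l + 1)) + 1 := by omega
  rw [this, List.take_succ_cons, List.getD_eq_getElem cats "" hl]

theorem pv_W_snoc (cats : List String) (p l : Nat) (hlp : l ≤ p) (hp : p < cats.length) :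
    pvW cats (p + 1) l = pvW cats p l ++ [cats.getD p ""] := by
  unfold pvW
  have h1 : p + 1 - l = (p - l) + 1 := by omega
  have h2 : p - l < (cats.drop l).length := by simp [List.length_drop]; omega
  rw [h1, List.take_add_one, List.getElem?_eq_getElem h2]
  have : (cats.drop l)[p - l] = cats[p]'hp := by
    rw [List.getElem_drop]; congr 1; omega
  simp [this, List.getD, List.getElem?_eq_getElem hp]

theorem pv_while_eq (cats : List String) (r : Nat) (hr : r < cats.length) :
    ∀ (fuel l : Nat) (b : PySem.Dict String Int), pvInv cats (r + 1) l b →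
      (pvAWhile cats fuel b l).2 = pvBWhile cats fuel l r ∧
      pvInv cats (r + 1) (pvAWhile cats fuel b l).2 (pvAWhile cats fuel b l).1 := by
  intro fuel
  induction fuel with
  | zero => intro l b hInv; exact ⟨rfl, hInv.1, hInv.2.1, hInv.2.2.1, hInv.2.2.2⟩
  | succ fuel ih =>
    intro l b hInv
    have hsz : b.size = (PySem.Set.ofList (pvW cats (r + 1) l)).length :=
      pv_size_eq_distinct cats (r + 1) l b hInv
    have hslice : PySem.List.slice cats (some (l : Int)) (some ((r : Int) + 1))
        = pvW cats (r + 1) l := by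
      have : ((r : Int) + 1) = ((r + 1 : Nat) : Int) := by push_cast; ring
      rw [this, PySem.List.slice_natCast]; rfl
    by_cases hcond : 2 < b.size
    · -- both loops take a step
      obtain ⟨hlp, hnd, hcnt, hmem⟩ := hInv
      -- window nonempty, hence l < r+1 and l < cats.length
      have hW_ne : pvW cats (r + 1) l ≠ [] := by
        intro hnil
        rw [hsz, hnil] at hcond
        simp [PySem.Set.ofList] at hcond
      have hlr : l < r + 1 := by
        by_contra h
        apply hW_ne; unfold pvW
        have : r + 1 - l = 0 := by omega
        simp [this]
      have hl : l < cats.length := by omega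
      set lc := cats.getD l "" with hlc
      have hWc : pvW cats (r + 1) l = lc :: pvW cats (r + 1) (l + 1) :=
        pv_W_cons cats (r + 1) l hlr hl
      set b1 := b.modify lc 0 (· - 1) with hb1
      set b2 := if b1.getD lc 0 = 0 then b1.erase lc else b1 with hb2
      -- counts after the decrement
      have hcnt1 : ∀ c, b1.getD c 0 = ((pvW cats (r + 1) (l + 1)).count c : Int) := by
        intro c
        rw [hb1, PySem.Dict.getD_modify, hcnt lc, hcnt c]
        by_cases hceq : c = lc
        · subst hceq; simp [hWc]
        · simp [hceq, hWc, Ne.symm hceq]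
      have hcnt2 : ∀ c, b2.getD c 0 = ((pvW cats (r + 1) (l + 1)).count c : Int) := by
        intro c
        rw [hb2]
        split
        · rename_i hz
          rw [pv_getD_erase]
          by_cases hceq : c = lc
          · subst hceq; rw [hcnt1 lc] at hz; simp [hz.symm]
          · simp [hceq, hcnt1 c]
        · exact hcnt1 c
      have hmem1 : ∀ c, c ∈ b1.keys ↔ c = lc ∨ c ∈ pvW cats (r + 1) (l + 1) := by
        intro c
        rw [hb1]
        unfold PySem.Dict.modify
        rw [PySem.Dict.mem_keys_insert]
        constructor
        · rintro (h | h)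
          · exact Or.inl h
          · rcases (hmem c).1 h with hw
            rw [hWc] at hw
            rcases List.mem_cons.1 hw with h' | h'
            · exact Or.inl h'
            · exact Or.inr h'
        · rintro (h | h)
          · exact Or.inl h
          · exact Or.inr ((hmem c).2 (by rw [hWc]; exact List.mem_cons_of_mem _ h))
      have hmem2 : ∀ c, c ∈ b2.keys ↔ c ∈ pvW cats (r + 1) (l + 1) := by
        intro c
        rw [hb2]
        split
        · rename_i hz
          rw [pv_keys_erase, List.mem_filter]
          constructor
          · rintro ⟨h, hne⟩
            have hclc : c ≠ lc := by simpa using hne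
            rcases (hmem1 c).1 h with h' | h'
            · exact absurd h' hclc
            · exact h'
          · intro h
            have hclc : c ≠ lc := by
              intro hceq
              rw [hceq] at h
              rw [hcnt1 lc] at hz
              have h0 : (pvW cats (r + 1) (l + 1)).count lc = 0 := by exact_mod_cast hz
              exact (List.count_eq_zero.1 h0) h
            exact ⟨(hmem1 c).2 (Or.inr h), by simp [hclc]⟩
        · rename_i hz
          rw [hmem1 c]
          constructor
          · rintro (h | h)
            · rw [← h] at hz
              rw [hcnt1 c] at hz
              have h0 : (pvW cats (r + 1) (l + 1)).count c ≠ 0 := by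
                intro h0; apply hz; rw [h0]; rfl
              exact List.count_pos_iff.1 (Nat.pos_of_ne_zero h0)
            · exact h
          · exact Or.inr
      have hnd1 : b1.keys.Nodup := by
        rw [hb1]; unfold PySem.Dict.modify; exact PySem.Dict.nodup_keys_insert _ _ _ hnd
      have hnd2 : b2.keys.Nodup := by
        rw [hb2]; split
        · rw [pv_keys_erase]; exact hnd1.filter _
        · exact hnd1
      have hInv' : pvInv cats (r + 1) (l + 1) b2 := ⟨by omega, hnd2, hcnt2, hmem2⟩
      have hA : pvAWhile cats (fuel + 1) b l = pvAWhile cats fuel b2 (l + 1) := by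
        rw [pvAWhile]; simp only [hcond, if_true]; rfl
      have hcondB : 2 < (PySem.Set.ofList
          (PySem.List.slice cats (some (l : Int)) (some ((r : Int) + 1)))).length := by
        rw [hslice, ← hsz]; exact hcond
      have hB : pvBWhile cats (fuel + 1) l r = pvBWhile cats fuel (l + 1) r := by
        rw [pvBWhile]; simp only [hcondB, if_true]
      rw [hA, hB]
      exact ih (l + 1) b2 hInv'
    · -- both loops stop
      have hcondB : ¬ 2 < (PySem.Set.ofList
          (PySem.List.slice cats (some (l : Int)) (some ((r : Int) + 1)))).length := by
        rw [hslice, ← hsz]; exact hcond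
      have hA : pvAWhile cats (fuel + 1) b l = (b, l) := by
        rw [pvAWhile]; simp only [hcond, if_false]
      have hB : pvBWhile cats (fuel + 1) l r = l := by
        rw [pvBWhile]; simp only [hcondB, if_false]
      rw [hA, hB]
      exact ⟨rfl, hInv⟩

theorem pv_outer (cats : List String) :
    ∀ r, r ≤ cats.length →
      ((List.range r).foldl (pvAStep cats) (0, 0, PySem.Dict.empty)).1
        = ((List.range r).foldl (pvBStep cats) (0, 0)).1 ∧
      ((List.range r).foldl (pvAStep cats) (0, 0, PySem.Dict.empty)).2.1
        = ((List.range r).foldl (pvBStep cats) (0, 0)).2 ∧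
      pvInv cats r ((List.range r).foldl (pvAStep cats) (0, 0, PySem.Dict.empty)).1
        ((List.range r).foldl (pvAStep cats) (0, 0, PySem.Dict.empty)).2.2 := by
  intro r
  induction r with
  | zero =>
    intro
    refine ⟨rfl, rfl, Nat.le_refl 0, ?_, ?_, ?_⟩
    · simp [PySem.Dict.keys, PySem.Dict.empty]
    · intro c; simp [PySem.Dict.getD, PySem.Dict.get?, PySem.Dict.empty, pvW]
    · intro c; simp [PySem.Dict.keys, PySem.Dict.empty, pvW]
  | succ r ih =>
    intro hr1
    have hr : r < cats.length := by omega
    obtain ⟨hleq, hmeq, hInv⟩ := ih (by omega)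
    set stA := (List.range r).foldl (pvAStep cats) (0, 0, PySem.Dict.empty) with hstA
    set stB := (List.range r).foldl (pvBStep cats) (0, 0) with hstB
    rw [List.range_succ, List.foldl_append, List.foldl_cons, List.foldl_nil,
        List.foldl_append, List.foldl_cons, List.foldl_nil]
    rw [← hstA, ← hstB]
    obtain ⟨hlp, hnd, hcnt, hmem⟩ := hInv
    set cat := cats.getD r "" with hcat
    set b' := stA.2.2.modify cat 0 (· + 1) with hb'
    have hWs : pvW cats (r + 1) stA.1 = pvW cats r stA.1 ++ [cat] :=
      pv_W_snoc cats r stA.1 hlp hr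
    have hInv' : pvInv cats (r + 1) stA.1 b' := by
      refine ⟨by omega, ?_, ?_, ?_⟩
      · rw [hb']; unfold PySem.Dict.modify; exact PySem.Dict.nodup_keys_insert _ _ _ hnd
      · intro c
        rw [hb', PySem.Dict.getD_modify, hWs]
        by_cases hceq : c = cat
        · rw [hceq]; simp [hcnt cat, List.count_append]
        · simp [hceq, hcnt c, List.count_append, Ne.symm hceq]
      · intro c
        rw [hb']
        unfold PySem.Dict.modify
        rw [PySem.Dict.mem_keys_insert, hWs]
        by_cases hceq : c = cat
        · subst hceq; simp
        · simp only [hceq, false_or, List.mem_append, List.mem_singleton, or_false]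
          exact hmem c
    obtain ⟨hwleft, hwInv⟩ := pv_while_eq cats r hr cats.length stA.1 b' hInv'
    constructor
    · show (pvAStep cats stA r).1 = (pvBStep cats stB r).1
      simp only [pvAStep, pvBStep, ← hb', ← hcat]
      rw [hwleft, hleq]
    constructor
    · show (pvAStep cats stA r).2.1 = (pvBStep cats stB r).2
      simp only [pvAStep, pvBStep, ← hb', ← hcat]
      rw [hwleft, hleq, hmeq]
    · show pvInv cats (r + 1) (pvAStep cats stA r).1 (pvAStep cats stA r).2.2
      simp only [pvAStep, ← hb', ← hcat]
      exact hwInv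

-- ===== VERDICT (by name: the statement is the Claim_ definition above) =====
theorem max_items_selected_spec : Claim_equal_max_items_selected := by
  intro cats _
  unfold Spec_max_items_selected max_items_selected max_items_selected_alt
  exact (pv_outer cats cats.length (Nat.le_refl _)).2.1
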